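-- pv_equiv track=rewrite | github.com/ClassicRevive/labwork | ca268/lab10/adj_to_edge.py | make_adjacency_matrix2
-- ===== SOURCE A (Python) =====
-- def make_adjacency_matrix2(edge_list):
--     ''' this is a second version of the above function '''
--
--     adjacency_matrix = []
--     num_nodes = len(edge_list)
--
--     for i in range(num_nodes):
--         adjacency_matrix.append([0 for i in range(num_nodes)])
--
--
--     for row in range(len(adjacency_matrix)):
--         for col in range(num_nodes):
--             for j in edge_list[row]:
--                 if ord(j) - ord('A') == col:
--                     adjacency_matrix[row][col] = 1
--
--     return adjacency_matrix
-- ===== SOURCE B (Python) =====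
-- def make_adjacency_matrix2(edge_list):
--     ''' this is a second version of the above function '''
--     n = len(edge_list)
--     adjacency_matrix = []
--     for s in edge_list:
--         row = [0] * n
--         for c in s:
--             k = ord(c) - ord('A')
--             if 0 <= k < n:
--                 row[k] = 1
--         adjacency_matrix.append(row)
--     return adjacency_matrix
-- ===== Notes on version B (the rewrite author's own statement) =====
-- stated objective: faster
-- what changed: Instead of scanning every row string once per column (n columns x full string scan), B walks each row's characters once and directly sets matrix[row][ord(c)-ord('A')] = 1 when that index is in range.
import Mathlib
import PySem

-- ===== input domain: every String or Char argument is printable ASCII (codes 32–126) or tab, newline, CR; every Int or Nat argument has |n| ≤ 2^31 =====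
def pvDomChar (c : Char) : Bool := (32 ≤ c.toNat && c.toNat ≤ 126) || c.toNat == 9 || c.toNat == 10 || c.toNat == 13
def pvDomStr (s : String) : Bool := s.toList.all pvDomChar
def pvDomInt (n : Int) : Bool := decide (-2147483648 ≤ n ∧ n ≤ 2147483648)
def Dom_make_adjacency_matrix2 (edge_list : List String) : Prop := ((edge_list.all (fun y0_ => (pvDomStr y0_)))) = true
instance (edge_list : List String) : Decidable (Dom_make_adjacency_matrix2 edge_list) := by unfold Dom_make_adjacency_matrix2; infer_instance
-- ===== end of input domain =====

-- B walks each row's characters once, setting the in-range column directly, instead of one full string scan per column.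
-- ===== PORT A =====
def make_adjacency_matrix2 (edge_list : List String) : List (List Int) :=
  let num_nodes := edge_list.length
  let adjacency_matrix : List (List Int) :=
    (List.range num_nodes).map (fun _ => (List.range num_nodes).map (fun _ => (0 : Int)))
  (List.range adjacency_matrix.length).map (fun row =>
    (List.range num_nodes).map (fun (col : Nat) =>
      ((edge_list.getD row "").toList).foldl
        (fun v j => if ((j.toNat : Int) - 65 == (col : Int)) then 1 else v)
        ((adjacency_matrix.getD row []).getD col 0)))

-- ===== PORT B =====
def make_adjacency_matrix2_alt (edge_list : List String) : List (List Int) :=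
  let n := edge_list.length
  edge_list.map (fun s =>
    s.toList.foldl
      (fun row c =>
        let k := (c.toNat : Int) - 65
        if 0 ≤ k ∧ k < (n : Int) then row.set k.toNat 1 else row)
      (List.replicate n (0 : Int)))

-- ===== PRECONDITION & SPEC =====
def Spec_make_adjacency_matrix2 (edge_list : List String) (out : List (List Int)) : Prop := out = make_adjacency_matrix2_alt edge_list
instance (edge_list : List String) (out : List (List Int)) : Decidable (Spec_make_adjacency_matrix2 edge_list out) := by unfold Spec_make_adjacency_matrix2; infer_instance

-- ===== CLAIM (what is proved, stated in full; the proofs are below) =====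
def Claim_equal_make_adjacency_matrix2 : Prop := ∀ (edge_list : List String), Dom_make_adjacency_matrix2 edge_list → Spec_make_adjacency_matrix2 edge_list (make_adjacency_matrix2 edge_list)

-- ===== LEMMAS AND PROOFS =====

-- ===== VERDICT (by name: the statement is the Claim_ definition above) =====
-- each cell of the freshly built zero matrix reads as 0
lemma zero_cell (n row col : Nat) :
    ((((List.range n).map (fun _ => (List.range n).map (fun _ => (0 : Int)))).getD row []).getD col 0) = 0 := by
  simp only [List.getD_eq_getElem?_getD, List.getElem?_map]
  cases (List.range n)[row]? with
  | none => simp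
  | some a =>
    simp only [Option.map_some, Option.getD_some, List.getElem?_map]
    cases (List.range n)[col]? <;> simp

-- B's single pass over the characters computes, column-wise, A's per-cell fold
lemma fold_row (n : Nat) (s : List Char) (g : Nat → Int) :
    s.foldl
      (fun row c =>
        let k := (c.toNat : Int) - 65
        if 0 ≤ k ∧ k < (n : Int) then row.set k.toNat 1 else row)
      ((List.range n).map g)
    = (List.range n).map (fun (col : Nat) =>
        s.foldl (fun v j => if ((j.toNat : Int) - 65 == (col : Int)) then 1 else v) (g col)) := by
  induction s generalizing g with
  | nil => simp
  | cons c rest ih =>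
    simp only [List.foldl_cons]
    by_cases hk : 0 ≤ (c.toNat : Int) - 65 ∧ (c.toNat : Int) - 65 < (n : Int)
    · have hset :
          ((List.range n).map g).set ((c.toNat : Int) - 65).toNat 1
          = (List.range n).map (fun (col : Nat) =>
              if ((c.toNat : Int) - 65 == (col : Int)) then (1 : Int) else g col) := by
        apply List.ext_getElem
        · simp
        · intro i h1 h2
          simp only [List.getElem_set, List.getElem_map, List.getElem_range]
          have hi : i < n := by simpa using h1
          by_cases he : ((c.toNat : Int) - 65).toNat = i
          · have : ((c.toNat : Int) - 65 == (i : Int)) = true := by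
              simp only [beq_iff_eq]; omega
            simp [he, this]
          · have : ((c.toNat : Int) - 65 == (i : Int)) = false := by
              simp only [beq_eq_false_iff_ne, ne_eq]; omega
            simp [he, this]
      rw [if_pos hk, hset, ih]
    · have hsame :
          (List.range n).map g
          = (List.range n).map (fun (col : Nat) =>
              if ((c.toNat : Int) - 65 == (col : Int)) then (1 : Int) else g col) := by
        apply List.map_congr_left
        intro col hcol
        have hc : col < n := List.mem_range.mp hcol
        have : ((c.toNat : Int) - 65 == (col : Int)) = false := by
          simp only [beq_eq_false_iff_ne, ne_eq]; omega
        simp [this]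
      rw [if_neg hk, hsame, ih]

-- indexing edge_list by row over range(len) is just mapping over edge_list
lemma map_range_getD {α β : Type} [Inhabited α] (l : List α) (d : α) (f : α → β) :
    (List.range l.length).map (fun row => f (l.getD row d)) = l.map f := by
  apply List.ext_getElem
  · simp
  · intro i h1 h2
    have hi : i < l.length := by simpa using h2
    simp [List.getD_eq_getElem?_getD, List.getElem?_eq_getElem hi]

theorem make_adjacency_matrix2_spec : Claim_equal_make_adjacency_matrix2 := by
  intro edge_list _
  unfold Spec_make_adjacency_matrix2 make_adjacency_matrix2 make_adjacency_matrix2_alt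
  simp only [List.length_map, List.length_range, zero_cell]
  rw [map_range_getD edge_list "" (fun s =>
    (List.range edge_list.length).map (fun (col : Nat) =>
      s.toList.foldl (fun v j => if ((j.toNat : Int) - 65 == (col : Int)) then 1 else v) 0))]
  apply List.map_congr_left
  intro s _
  rw [← fold_row edge_list.length s.toList (fun _ => 0)]
  congr 1
  rw [List.map_const', List.length_range]
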